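-- pv_equiv track=rewrite | github.com/Pengppi/algorithm-practice | leetcode/src/main/python/leetcode/editor/cn/新增道路查询后的最短距离IIshortestDistanceAfterRoadAdditionQueriesIi.py | shortestDistanceAfterQueries
-- ===== SOURCE A (Python) =====
-- from typing import List
--
-- def shortestDistanceAfterQueries(n: int, queries: List[List[int]]) -> List[int]:
--     fa = list(range(n - 1))
--
--     def find(x: int):
--         if fa[x] != x:
--             fa[x] = find(fa[x])
--         return fa[x]
--
--     ans = []
--     cnt = n - 1
--     for l, r in queries:
--         rr = find(r - 1)
--         i = find(l)
--         while i < r - 1: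
--             cnt -= 1
--             fa[i] = rr
--             i = find(i + 1)
--         ans.append(cnt)
--     return ans
-- ===== SOURCE B (Python) =====
-- from bisect import bisect_left
-- from typing import List
--
-- def shortestDistanceAfterQueries(n: int, queries: List[List[int]]) -> List[int]:
--     active = list(range(n - 1))  # edge positions still on the shortest path
--     cnt = n - 1
--     ans = []
--     for l, r in queries:
--         i = bisect_left(active, l)
--         j = bisect_left(active, r - 1)
--         del active[i:j]
--         cnt -= j - i
--         ans.append(cnt)
--     return ans
-- ===== Notes on version B (the rewrite author's own statement) =====
-- stated objective: alternative
-- what changed: Replaces the recursive union-find with path compression by a sorted list of still-active edge positions: each query locates its affected span with bisect_left and deletes it as one slice.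
-- outside the precondition, e.g. on shortestDistanceAfterQueries(5, [[-1, 3]]): A returns [4], B returns [2]
import Mathlib
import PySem

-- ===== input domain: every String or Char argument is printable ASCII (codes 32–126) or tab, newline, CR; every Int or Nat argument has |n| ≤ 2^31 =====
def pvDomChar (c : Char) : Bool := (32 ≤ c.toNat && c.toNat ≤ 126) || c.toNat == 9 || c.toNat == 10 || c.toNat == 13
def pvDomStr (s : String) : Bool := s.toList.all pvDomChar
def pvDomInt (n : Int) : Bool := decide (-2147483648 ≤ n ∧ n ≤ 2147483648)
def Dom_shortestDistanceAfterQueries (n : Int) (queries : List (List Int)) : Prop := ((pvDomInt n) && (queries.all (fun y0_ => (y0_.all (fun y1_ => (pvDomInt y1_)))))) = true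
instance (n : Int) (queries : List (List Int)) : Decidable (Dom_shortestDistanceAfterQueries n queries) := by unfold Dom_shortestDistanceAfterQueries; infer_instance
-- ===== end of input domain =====

-- B replaces A's recursive union-find (path compression) by a sorted list of still-active
-- edge positions, per query located with bisect_left and deleted as one slice; equal returns on Pre_.

-- ===== PORT A =====
def findA (fuel : Nat) (fa : List Int) (x : Int) : List Int × Int :=
  match fuel with
  | 0 => (fa, x)
  | fuel + 1 =>
    match PySem.List.pyGet? fa x with
    | none => (fa, x)
    | some v =>
      if v ≠ x then
        let p := findA fuel fa v
        (PySem.List.pySetD p.1 x p.2, p.2)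
      else (fa, v)

def loopA (fuel : Nat) (fa : List Int) (cnt i rr r : Int) : List Int × Int :=
  match fuel with
  | 0 => (fa, cnt)
  | fuel + 1 =>
    if i < r - 1 then
      let fa1 := PySem.List.pySetD fa i rr
      let p := findA (fa1.length + 1) fa1 (i + 1)
      loopA fuel p.1 (cnt - 1) p.2 rr r
    else (fa, cnt)

def stepA (st : List Int × Int × List Int) (q : List Int) : List Int × Int × List Int :=
  match q with
  | [l, r] =>
    let fa := st.1
    let cnt := st.2.1
    let ans := st.2.2
    let p1 := findA (fa.length + 1) fa (r - 1)
    let rr := p1.2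
    let p2 := findA (p1.1.length + 1) p1.1 l
    let res := loopA (p2.1.length + 1) p2.1 cnt p2.2 rr r
    (res.1, res.2, ans ++ [res.2])
  | _ => st

def shortestDistanceAfterQueries (n : Int) (queries : List (List Int)) : List Int :=
  (queries.foldl stepA (PySem.List.pyRange 0 (n - 1) 1, n - 1, [])).2.2

-- ===== PORT B =====
def stepB (st : List Int × Int × List Int) (q : List Int) : List Int × Int × List Int :=
  match q with
  | [l, r] =>
    let active := st.1
    let cnt := st.2.1
    let ans := st.2.2
    let i := PySem.List.bisectLeft active l
    let j := PySem.List.bisectLeft active (r - 1)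
    -- del active[i:j]: removes exactly the indices i ≤ k < j (a no-op when j ≤ i);
    -- hand-ported (no PySem slice-deletion primitive), exact for 0 ≤ i, j ≤ len(active)
    let active' := active.take i ++ active.drop (max i j)
    let cnt' := cnt - ((j : Int) - (i : Int))
    (active', cnt', ans ++ [cnt'])
  | _ => st

def shortestDistanceAfterQueries_alt (n : Int) (queries : List (List Int)) : List Int :=
  (queries.foldl stepB (PySem.List.pyRange 0 (n - 1) 1, n - 1, [])).2.2

-- ===== PRECONDITION & SPEC =====
-- Pre_ restricts to the problem's natural domain: every query is a pair [l, r] with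
-- 0 ≤ l < r ≤ n - 1.  Outside it A raises (IndexError, or ValueError on unpacking) or,
-- for negative endpoints that happen to stay in range, returns values produced by
-- Python's negative-index wraparound, which B does not reproduce (see claim cites).
def Pre_shortestDistanceAfterQueries (n : Int) (queries : List (List Int)) : Prop :=
  ∀ q ∈ queries, q.length = 2 ∧ 0 ≤ q.getD 0 0 ∧ q.getD 0 0 < q.getD 1 0 ∧ q.getD 1 0 ≤ n - 1
instance (n : Int) (queries : List (List Int)) : Decidable (Pre_shortestDistanceAfterQueries n queries) := by
  unfold Pre_shortestDistanceAfterQueries; infer_instance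

def pvWitness_shortestDistanceAfterQueries : Int × List (List Int) := (5, [[0, 3], [2, 4], [1, 2]])

def Spec_shortestDistanceAfterQueries (n : Int) (queries : List (List Int)) (out : List Int) : Prop := out = shortestDistanceAfterQueries_alt n queries
instance (n : Int) (queries : List (List Int)) (out : List Int) : Decidable (Spec_shortestDistanceAfterQueries n queries out) := by unfold Spec_shortestDistanceAfterQueries; infer_instance

-- ===== CLAIM (what is proved, stated in full; the proofs are below) =====
def Claim_equal_shortestDistanceAfterQueries : Prop := ∀ (n : Int) (queries : List (List Int)), Dom_shortestDistanceAfterQueries n queries → Pre_shortestDistanceAfterQueries n queries → Spec_shortestDistanceAfterQueries n queries (shortestDistanceAfterQueries n queries)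

-- ===== LEMMAS AND PROOFS =====

-- next active position ≥ p (the abstract root function)
def gnext (S : List Int) (p : Int) : Int :=
  match S.dropWhile (fun a => decide (a < p)) with
  | [] => p
  | a :: _ => a

lemma gnext_ge (S : List Int) (p : Int) : p ≤ gnext S p := by
  unfold gnext
  rcases hd : S.dropWhile (fun a => decide (a < p)) with _ | ⟨a, t⟩
  · simp
  · have := List.head_dropWhile_not (l := S) (p := fun a => decide (a < p)) (by simp [hd])
    simp [hd] at this ⊢; omega

lemma gnext_eq_self (S : List Int) (p : Int) (h : ∀ a ∈ S, a < p) : gnext S p = p := by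
  unfold gnext
  have : S.dropWhile (fun a => decide (a < p)) = [] := by
    rw [List.dropWhile_eq_nil_iff]; intro a ha; simpa using h a ha
  simp [this]

lemma mem_dropWhile_ge (S : List Int) (p : Int) (hs : S.Pairwise (· < ·)) :
    ∀ a ∈ S.dropWhile (fun a => decide (a < p)), p ≤ a := by
  induction S with
  | nil => simp
  | cons b t ih =>
    intro a ha
    rw [List.dropWhile_cons] at ha
    by_cases hb : b < p
    · simp [hb] at ha; exact ih hs.of_cons a ha
    · simp [hb] at ha
      rcases ha with rfl | ha
      · omega
      · have := (List.pairwise_cons.1 hs).1 a ha; omega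

lemma mem_takeWhile_lt (S : List Int) (p : Int) :
    ∀ a ∈ S.takeWhile (fun a => decide (a < p)), a < p := by
  intro a ha
  have := List.mem_takeWhile_imp ha; simpa using this

lemma gnext_mem_or (S : List Int) (p : Int) :
    gnext S p ∈ S ∨ (gnext S p = p ∧ ∀ a ∈ S, a < p) := by
  unfold gnext
  rcases hd : S.dropWhile (fun a => decide (a < p)) with _ | ⟨a, t⟩
  · right
    refine ⟨rfl, ?_⟩
    rw [List.dropWhile_eq_nil_iff] at hd
    intro a ha; simpa using hd a ha
  · left
    have : a ∈ S.dropWhile (fun a => decide (a < p)) := by simp [hd]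
    exact (List.dropWhile_sublist _).mem this

lemma gnext_le (S : List Int) (p x : Int) (hs : S.Pairwise (· < ·)) (hx : x ∈ S) (hpx : p ≤ x) :
    gnext S p ≤ x := by
  unfold gnext
  rcases hd : S.dropWhile (fun a => decide (a < p)) with _ | ⟨a, t⟩
  · exact hpx
  · -- x is in the dropWhile part, whose head is a
    have hxd : x ∈ a :: t := by
      rw [← hd]
      have : x ∈ S.takeWhile (fun a => decide (a < p)) ∨ x ∈ S.dropWhile (fun a => decide (a < p)) := by
        rw [← List.mem_append, List.takeWhile_append_dropWhile]; exact hx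
      rcases this with h | h
      · exact absurd (mem_takeWhile_lt S p x h) (by omega)
      · exact h
    have hpair : (a :: t).Pairwise (· < ·) := by
      rw [← hd]; exact hs.sublist (List.dropWhile_sublist _)
    rcases List.mem_cons.1 hxd with rfl | hxt
    · simp
    · have := (List.pairwise_cons.1 hpair).1 x hxt; simp; omega

lemma gnext_mem (S : List Int) (p x : Int) (hx : x ∈ S) (hpx : p ≤ x) : gnext S p ∈ S := by
  rcases gnext_mem_or S p with h | ⟨_, h⟩
  · exact h
  · exact absurd (h x hx) (by omega)

lemma gnext_self (S : List Int) (a : Int) (hs : S.Pairwise (· < ·)) (ha : a ∈ S) : gnext S a = a :=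
  le_antisymm (gnext_le S a a hs ha le_rfl) (gnext_ge S a)

lemma gnext_eq_of (S : List Int) (p g : Int) (hs : S.Pairwise (· < ·)) (hg : g ∈ S) (hpg : p ≤ g)
    (hmin : ∀ a ∈ S, p ≤ a → g ≤ a) : gnext S p = g := by
  have h1 : gnext S p ≤ g := gnext_le S p g hs hg hpg
  rcases gnext_mem_or S p with h | ⟨he, h⟩
  · have := hmin _ h (gnext_ge S p); omega
  · exact absurd (h g hg) (by omega)

lemma gnext_lt_iff (S : List Int) (p a : Int) (hs : S.Pairwise (· < ·)) (ha : a ∈ S) :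
    a < gnext S p ↔ a < p := by
  constructor
  · intro h; by_contra hc; push Not at hc
    have := gnext_le S p a hs ha hc; omega
  · intro h; have := gnext_ge S p; omega

-- invariant: fixpoints of fa are fixpoints of h, parent links preserve h and increase
def Kg (fa : List Int) (h : Int → Int) : Prop :=
  ∀ (k : Nat) (hk : k < fa.length),
    (fa[k] = (k : Int) → h k = k) ∧
    (fa[k] ≠ (k : Int) → (k : Int) < fa[k] ∧ fa[k] < (fa.length : Int) ∧ h fa[k] = h (k : Int))

lemma findA_spec (L : Nat) (h : Int → Int)
    (Hinfl : ∀ p : Int, 0 ≤ p → p < (L : Int) → p ≤ h p ∧ h p < (L : Int))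
    (Hidem : ∀ p : Int, 0 ≤ p → p < (L : Int) → h (h p) = h p) :
    ∀ (fuel : Nat) (fa : List Int) (x : Int), fa.length = L → Kg fa h →
      0 ≤ x → x < (L : Int) → L - x.toNat ≤ fuel →
      ∃ fa', findA fuel fa x = (fa', h x) ∧ fa'.length = L ∧ Kg fa' h := by
  intro fuel
  induction fuel with
  | zero => intro fa x hlen hkg hx0 hxL hf; omega
  | succ fuel ih =>
    intro fa x hlen hkg hx0 hxL hf
    have hxN : x.toNat < fa.length := by omega
    have hget : PySem.List.pyGet? fa x = some fa[x.toNat] :=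
      PySem.List.pyGet?_eq_some_getElem (xs := fa) (i := x) (by omega) (by omega)
    have hcast : ((x.toNat : Nat) : Int) = x := by omega
    have hkgx := hkg x.toNat hxN
    by_cases hv : fa[x.toNat] = x
    · -- fa[x] == x: return x, h x = x
      have hhx : h x = x := by have := hkgx.1 (by rw [hv, hcast]); rwa [hcast] at this
      refine ⟨fa, ?_, hlen, hkg⟩
      simp [findA, hget, hv, hhx]
    · have hstep := hkgx.2 (by rw [hcast]; exact hv)
      rw [hcast] at hstep
      set v := fa[x.toNat] with hvdef
      have hv0 : 0 ≤ v := by omega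
      have hvL : v < (L : Int) := by omega
      obtain ⟨fa1, heq1, hlen1, hkg1⟩ := ih fa v hlen hkg hv0 hvL (by omega)
      have hhvx : h v = h x := hstep.2.2
      refine ⟨fa1.set x.toNat (h x), ?_, by simp [hlen1], ?_⟩
      · show findA (fuel + 1) fa x = _
        unfold findA
        rw [hget]
        simp only [hv, heq1, ne_eq, not_false_eq_true, if_pos]
        rw [PySem.List.pySetD_of_nonneg (h := hx0)]
        simp [hhvx]
      · -- Kg of the path-compressed array
        intro k hk
        simp only [List.length_set] at hk
        by_cases hkx : k = x.toNat
        · subst hkx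
          rw [List.getElem_set_self (by omega)]
          constructor
          · intro he; rw [hcast] at he ⊢; rw [he]
          · intro hne
            rw [hcast] at hne ⊢
            have h1 := (Hinfl x hx0 hxL).1
            have h2 := (Hinfl x hx0 hxL).2
            refine ⟨by omega, by simp [hlen1]; omega, ?_⟩
            exact Hidem x hx0 hxL
        · rw [List.getElem_set_ne (by omega)]
          have := hkg1 k (by omega)
          simpa using this

def SOK (L : Nat) (S : List Int) : Prop :=
  S.Pairwise (· < ·) ∧ (∀ a ∈ S, 0 ≤ a ∧ a < (L : Int)) ∧ ((L : Int) - 1) ∈ S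

lemma Kg_congr (fa : List Int) (h h' : Int → Int) (he : ∀ p, h p = h' p) (hk : Kg fa h) :
    Kg fa h' := by
  intro k hkk
  have := hk k hkk
  constructor
  · intro hfix; rw [← he]; exact this.1 hfix
  · intro hne; have t := this.2 hne; exact ⟨t.1, t.2.1, by rw [← he, ← he]; exact t.2.2⟩

lemma countP_split (p q : Int → Bool) (i : Int) :
    ∀ S : List Int, S.Nodup → i ∈ S → (∀ a ∈ S, p a = true ↔ (q a = true ∨ a = i)) →
      q i = false → S.countP p = S.countP q + 1 := by
  intro S
  induction S with
  | nil => simp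
  | cons b t ih =>
    intro hnd hi hpq hqi
    by_cases hbi : b = i
    · subst hbi
      have hpb : p b = true := (hpq b (by simp)).2 (Or.inr rfl)
      have hqt : t.countP p = t.countP q := by
        apply List.countP_congr
        intro a ha
        have hab : a ≠ b := by rintro rfl; exact (List.nodup_cons.1 hnd).1 ha
        have hiff := hpq a (List.mem_cons_of_mem b ha)
        rcases hp : p a with _ | _ <;> rcases hq : q a with _ | _ <;> simp_all
      rw [List.countP_cons, List.countP_cons]
      simp [hpb, hqi, hqt]
    · have hit : i ∈ t := by rcases List.mem_cons.1 hi with h | h; exact absurd h.symm hbi; exact h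
      have hrec := ih (List.nodup_cons.1 hnd).2 hit
        (fun a ha => hpq a (List.mem_cons_of_mem b ha)) hqi
      have hpb : p b = q b := by
        have hiff := hpq b (by simp)
        rcases hp : p b with _ | _ <;> rcases hq : q b with _ | _ <;> simp_all
      rw [List.countP_cons, List.countP_cons, hpb, hrec]
      ring

lemma loopA_spec (L : Nat) (S : List Int) (l r rr : Int)
    (hS : SOK L S) (hrr : rr = gnext S (r - 1)) (hr1 : 0 ≤ r - 1) (hr2 : r - 1 < (L : Int))
    (hl : 0 ≤ l) (hlr : l ≤ r - 1) :
    ∀ (fuel : Nat) (fa : List Int) (cnt i : Int) (R : List Int),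
      fa.length = L → i ∈ S → l ≤ i →
      (∀ s ∈ S, s < i → s < r - 1) →
      (∀ x : Int, x ∈ R ↔ (x ∈ S ∧ l ≤ x ∧ x < i)) →
      Kg fa (fun p => if gnext S p ∈ R then rr else gnext S p) →
      (r - 1 - i).toNat ≤ fuel →
      ∃ fa', loopA fuel fa cnt i rr r =
          (fa', cnt - (S.countP (fun a => decide (i ≤ a) && decide (a < r - 1)) : Int)) ∧
        fa'.length = L ∧
        Kg fa' (fun p => if l ≤ gnext S p ∧ gnext S p < r - 1 then rr else gnext S p) := by
  obtain ⟨hsort, hbnd, hlast⟩ := hS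
  have hrrS : rr ∈ S := hrr ▸ gnext_mem S (r - 1) ((L : Int) - 1) hlast (by omega)
  have hrrge : r - 1 ≤ rr := hrr ▸ gnext_ge S (r - 1)
  have hrrL : rr < (L : Int) := (hbnd rr hrrS).2
  intro fuel
  induction fuel with
  | zero =>
    intro fa cnt i R hlen hiS hli hgap hR hkg hf
    have hir : ¬ i < r - 1 := by omega
    refine ⟨fa, ?_, hlen, ?_⟩
    · have hc : S.countP (fun a => decide (i ≤ a) && decide (a < r - 1)) = 0 := by
        rw [List.countP_eq_zero]
        intro a _; simp; omega
      simp [loopA, hc]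
    · apply Kg_congr _ _ _ _ hkg
      intro p
      by_cases hm : gnext S p ∈ R
      · have h1 := (hR _).1 hm
        have : l ≤ gnext S p ∧ gnext S p < r - 1 := ⟨h1.2.1, hgap _ h1.1 h1.2.2⟩
        simp [hm, this]
      · have hnot : ¬ (l ≤ gnext S p ∧ gnext S p < r - 1) := by
          intro ⟨h1, h2⟩
          rcases gnext_mem_or S p with hgm | ⟨hge, hall⟩
          · exact hm ((hR _).2 ⟨hgm, h1, by omega⟩)
          · have := hall _ hlast; omega
        simp [hm, hnot]
  | succ fuel ih =>
    intro fa cnt i R hlen hiS hli hgap hR hkg hf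
    by_cases hir : i < r - 1
    · -- one more merge step
      have hi0 : 0 ≤ i := by omega
      have hiL : i < (L : Int) := (hbnd i hiS).2
      have hRlt : ∀ x ∈ R, x < i := fun x hx => ((hR x).1 hx).2.2
      have hrrnR : rr ∉ R := fun hx => by have := hRlt rr hx; omega
      have hinR : i ∉ R := fun hx => by have := hRlt i hx; omega
      set h' : Int → Int := fun p => if gnext S p ∈ R ∨ gnext S p = i then rr else gnext S p with hh'
      have hgi : gnext S i = i := gnext_self S i hsort hiS
      have hh'rr : h' rr = rr := by
        have hgrr := gnext_self S rr hsort hrrS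
        simp only [hh', hgrr, ite_self]
      -- Kg of fa.set i rr w.r.t. h'
      have hkg1 : Kg (fa.set i.toNat rr) h' := by
        intro k hk
        simp only [List.length_set] at hk ⊢
        by_cases hki : k = i.toNat
        · subst hki
          rw [List.getElem_set_self (by omega)]
          have hcast : ((i.toNat : Nat) : Int) = i := by omega
          constructor
          · intro he; omega
          · intro _
            refine ⟨by omega, by omega, ?_⟩
            rw [hh'rr, hcast]
            have hc : gnext S i ∈ R ∨ gnext S i = i := Or.inr hgi
            simp only [hh', hc, if_pos]
        · rw [List.getElem_set_ne (by omega)]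
          have hkk := hkg k (by omega)
          have hcast : (k : Int) ≠ i := by omega
          constructor
          · intro hfix
            have hv : (if gnext S (k : Int) ∈ R then rr else gnext S (k : Int)) = (k : Int) :=
              hkk.1 hfix
            show (if gnext S (k : Int) ∈ R ∨ gnext S (k : Int) = i then rr else gnext S (k : Int)) = (k : Int)
            by_cases hm : gnext S (k : Int) ∈ R
            · simp only [hm, if_pos] at hv
              simp only [hm, true_or, if_pos]
              exact hv
            · simp only [hm, if_neg, not_false_eq_true] at hv
              have hc : ¬ (gnext S (k : Int) ∈ R ∨ gnext S (k : Int) = i) := by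
                rw [hv]
                rintro (h | h)
                · exact hm (by rw [hv]; exact h)
                · exact hcast h
              simp only [hc, if_neg, not_false_eq_true]
              exact hv
          · intro hne
            have ht := hkk.2 hne
            refine ⟨ht.1, by omega, ?_⟩
            have heq : (if gnext S fa[k] ∈ R then rr else gnext S fa[k]) =
                (if gnext S (k : Int) ∈ R then rr else gnext S (k : Int)) := ht.2.2
            show (if gnext S fa[k] ∈ R ∨ gnext S fa[k] = i then rr else gnext S fa[k]) =
                (if gnext S (k : Int) ∈ R ∨ gnext S (k : Int) = i then rr else gnext S (k : Int))
            by_cases bA : gnext S fa[k] ∈ R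
            · simp only [bA, if_pos, true_or] at heq ⊢
              by_cases bK : gnext S (k : Int) ∈ R
              · simp [bK]
              · simp only [bK, if_neg, not_false_eq_true] at heq
                have hcK : gnext S (k : Int) ≠ i := by omega
                simp only [bK, hcK, or_self, if_neg, not_false_eq_true]
                exact heq
            · by_cases cA : gnext S fa[k] = i
              · simp only [bA, if_neg, not_false_eq_true] at heq
                by_cases bK : gnext S (k : Int) ∈ R
                · simp only [bK, if_pos] at heq; omega
                · simp only [bK, if_neg, not_false_eq_true] at heq
                  have hcK : gnext S (k : Int) = i := by omega
                  simp [cA, hcK]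
              · simp only [bA, if_neg, not_false_eq_true] at heq
                by_cases bK : gnext S (k : Int) ∈ R
                · simp only [bK, if_pos] at heq
                  simp [bK, heq]
                · simp only [bK, if_neg, not_false_eq_true] at heq
                  have hcK : gnext S (k : Int) ≠ i := by rw [← heq]; exact cA
                  simp only [bA, cA, bK, hcK, or_self, if_neg, not_false_eq_true]
                  exact heq
      have hRle : ∀ x ∈ R, l ≤ x := fun x hx => ((hR x).1 hx).2.1
      have h'infl : ∀ p : Int, 0 ≤ p → p < (L : Int) → p ≤ h' p ∧ h' p < (L : Int) := by
        intro p hp0 hpL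
        by_cases hm : gnext S p ∈ R ∨ gnext S p = i
        · have hple : p ≤ gnext S p := gnext_ge S p
          have hgle : gnext S p ≤ i := by
            rcases hm with h | h
            · have := hRlt _ h; omega
            · omega
          simp only [hh', hm, if_pos]
          constructor <;> omega
        · simp only [hh', hm, if_neg, not_false_eq_true]
          refine ⟨gnext_ge S p, ?_⟩
          rcases gnext_mem_or S p with hgm | ⟨hge, _⟩
          · exact (hbnd _ hgm).2
          · omega
      have h'idem : ∀ p : Int, 0 ≤ p → p < (L : Int) → h' (h' p) = h' p := by
        intro p hp0 hpL
        by_cases hm : gnext S p ∈ R ∨ gnext S p = i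
        · have hpv : h' p = rr := by simp only [hh', hm, if_pos]
          rw [hpv, hh'rr]
        · have hval : h' p = gnext S p := by simp only [hh', hm, if_neg, not_false_eq_true]
          rw [hval]
          rcases gnext_mem_or S p with hgm | ⟨hge, hall⟩
          · have hgg := gnext_self S _ hsort hgm
            simp only [hh', hgg, hm, if_neg, not_false_eq_true]
          · rw [hge]
            simp only [hh', hge]
            rw [hge] at hm
            simp [hm]
      have hlen1 : (fa.set i.toNat rr).length = L := by simp [hlen]
      obtain ⟨fa2, hfind, hlen2, hkg2⟩ :=
        findA_spec L h' h'infl h'idem ((fa.set i.toNat rr).length + 1) (fa.set i.toNat rr)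
          (i + 1) hlen1 hkg1 (by omega) (by omega) (by omega)
      have hgnip : i + 1 ≤ gnext S (i + 1) := gnext_ge S (i + 1)
      have hi'S : gnext S (i + 1) ∈ S := gnext_mem S (i + 1) ((L : Int) - 1) hlast (by omega)
      have hi' : h' (i + 1) = gnext S (i + 1) := by
        have hc : ¬ (gnext S (i + 1) ∈ R ∨ gnext S (i + 1) = i) := by
          rintro (h | h)
          · have := hRlt _ h; omega
          · omega
        simp only [hh', hc, if_neg, not_false_eq_true]
      set i' := gnext S (i + 1) with hi'def
      have hR' : ∀ x : Int, x ∈ R ++ [i] ↔ (x ∈ S ∧ l ≤ x ∧ x < i') := by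
        intro x
        simp only [List.mem_append, List.mem_singleton, hR]
        constructor
        · rintro (⟨h1, h2, h3⟩ | rfl)
          · exact ⟨h1, h2, by omega⟩
          · exact ⟨hiS, hli, by omega⟩
        · rintro ⟨h1, h2, h3⟩
          have hx1 : x < i + 1 := (gnext_lt_iff S (i + 1) x hsort h1).1 (hi'def ▸ h3)
          by_cases hxi : x = i
          · right; exact hxi
          · left; exact ⟨h1, h2, by omega⟩
      have hkg2' : Kg fa2 (fun p => if gnext S p ∈ R ++ [i] then rr else gnext S p) := by
        apply Kg_congr _ _ _ _ hkg2
        intro p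
        simp only [hh', List.mem_append, List.mem_singleton]
      obtain ⟨fa3, hloop, hlen3, hkg3⟩ := ih fa2 (cnt - 1) i' (R ++ [i]) hlen2 hi'S (by omega)
        (by intro s hs hsi
            have hs1 : s < i + 1 := (gnext_lt_iff S (i + 1) s hsort hs).1 (hi'def ▸ hsi)
            by_cases hsi2 : s = i
            · omega
            · exact hgap s hs (by omega))
        hR' hkg2' (by omega)
      refine ⟨fa3, ?_, hlen3, hkg3⟩
      show loopA (fuel + 1) fa cnt i rr r = _
      unfold loopA
      rw [if_pos hir]
      simp only []
      rw [PySem.List.pySetD_of_nonneg (h := hi0)]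
      rw [hfind, hi']
      rw [hloop]
      congr 1
      have hcount : S.countP (fun a => decide (i ≤ a) && decide (a < r - 1)) =
          S.countP (fun a => decide (i' ≤ a) && decide (a < r - 1)) + 1 := by
        apply countP_split _ _ i S hsort.nodup hiS
        · intro a ha
          constructor
          · intro hp
            simp only [Bool.and_eq_true, decide_eq_true_eq] at hp
            by_cases hai : a = i
            · right; exact hai
            · left
              have ha1 : i + 1 ≤ a := by omega
              have := gnext_le S (i + 1) a hsort ha ha1
              simp only [Bool.and_eq_true, decide_eq_true_eq]
              omega
          · intro hq
            rcases hq with hq | rfl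
            · simp only [Bool.and_eq_true, decide_eq_true_eq] at hq ⊢
              omega
            · simp only [Bool.and_eq_true, decide_eq_true_eq]
              omega
        · simp; omega
      rw [hcount]
      push_cast
      ring
    · refine ⟨fa, ?_, hlen, ?_⟩
      · have hc : S.countP (fun a => decide (i ≤ a) && decide (a < r - 1)) = 0 := by
          rw [List.countP_eq_zero]
          intro a _; simp; omega
        show loopA (fuel + 1) fa cnt i rr r = _
        unfold loopA
        rw [if_neg hir, hc]
        simp
      · apply Kg_congr _ _ _ _ hkg
        intro p
        by_cases hm : gnext S p ∈ R
        · have h1 := (hR _).1 hm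
          have : l ≤ gnext S p ∧ gnext S p < r - 1 := ⟨h1.2.1, hgap _ h1.1 h1.2.2⟩
          simp [hm, this]
        · have hnot : ¬ (l ≤ gnext S p ∧ gnext S p < r - 1) := by
            intro ⟨h1, h2⟩
            rcases gnext_mem_or S p with hgm | ⟨hge, hall⟩
            · exact hm ((hR _).2 ⟨hgm, h1, by omega⟩)
            · have := hall _ hlast; omega
          simp [hm, hnot]

lemma bisect_eq_takeWhile (S : List Int) (x : Int) (hs : S.Pairwise (· < ·)) :
    PySem.List.bisectLeft S x = (S.takeWhile (fun a => decide (a < x))).length := by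
  obtain ⟨hb1, hb2, hb3⟩ := PySem.List.bisectLeft_spec S x (hs.imp (fun h => le_of_lt h))
  set b := PySem.List.bisectLeft S x with hb
  set t := (S.takeWhile (fun a => decide (a < x))).length with ht
  have htle : t ≤ S.length := by rw [ht]; exact (List.takeWhile_sublist _).length_le
  rcases lt_trichotomy b t with h | h | h
  · exfalso
    have hbS : b < S.length := by omega
    have hpre : S.takeWhile (fun a => decide (a < x)) <+: S := List.takeWhile_prefix _
    have hgetb : (S.takeWhile (fun a => decide (a < x)))[b]'(by omega) = S[b] :=
      hpre.getElem (by omega)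
    have hmem : S[b] ∈ S.takeWhile (fun a => decide (a < x)) := by
      rw [← hgetb]; exact List.getElem_mem _
    have := List.mem_takeWhile_imp hmem
    have hxb := hb3 b hbS le_rfl
    simp at this; omega
  · exact h
  · exfalso
    have htS : t < S.length := by omega
    have hlt := hb2 t htS h
    have hdw : S.drop t = S.dropWhile (fun a => decide (a < x)) := by
      conv_lhs => rw [← List.takeWhile_append_dropWhile (p := fun a => decide (a < x)) (l := S)]
      rw [List.drop_left' ht.symm]
    have hne : S.dropWhile (fun a => decide (a < x)) ≠ [] := by
      rw [← hdw]; intro hcon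
      have := congrArg List.length hcon; simp at this; omega
    have hhead := List.head_dropWhile_not (l := S) (p := fun a => decide (a < x)) hne
    have hget : (S.dropWhile (fun a => decide (a < x))).head hne = S[t] := by
      conv_rhs => rw [show S[t] = (S.drop t).head (by rw [hdw]; exact hne) from (List.head_drop _).symm]
      congr 1
      exact hdw.symm
    rw [hget] at hhead
    simp at hhead
    omega

lemma take_bisect (S : List Int) (x : Int) (hs : S.Pairwise (· < ·)) :
    S.take (PySem.List.bisectLeft S x) = S.takeWhile (fun a => decide (a < x)) := by
  rw [bisect_eq_takeWhile S x hs]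
  exact (List.prefix_iff_eq_take.mp (List.takeWhile_prefix _)).symm

lemma drop_bisect (S : List Int) (x : Int) (hs : S.Pairwise (· < ·)) :
    S.drop (PySem.List.bisectLeft S x) = S.dropWhile (fun a => decide (a < x)) := by
  have h := List.drop_left' (l₁ := S.takeWhile (fun a => decide (a < x)))
    (l₂ := S.dropWhile (fun a => decide (a < x))) (bisect_eq_takeWhile S x hs).symm
  rwa [List.takeWhile_append_dropWhile] at h

lemma takeWhile_mono_split (S : List Int) (l r1 : Int) (hlr : l ≤ r1) :
    S.takeWhile (fun a => decide (a < r1)) =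
      S.takeWhile (fun a => decide (a < l)) ++
        ((S.dropWhile (fun a => decide (a < l))).takeWhile (fun a => decide (a < r1))) := by
  conv_lhs => rw [← List.takeWhile_append_dropWhile (p := fun a => decide (a < l)) (l := S)]
  rw [List.takeWhile_append]
  have hself : (S.takeWhile (fun a => decide (a < l))).takeWhile (fun a => decide (a < r1)) =
      S.takeWhile (fun a => decide (a < l)) := by
    apply List.takeWhile_eq_self_iff.mpr
    intro a ha
    have := List.mem_takeWhile_imp ha
    simp at this ⊢; omega
  rw [hself]
  simp

lemma countP_sorted_lt (T : List Int) (x : Int) (hs : T.Pairwise (· < ·)) :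
    T.countP (fun a => decide (a < x)) = (T.takeWhile (fun a => decide (a < x))).length := by
  conv_lhs => rw [← List.takeWhile_append_dropWhile (p := fun a => decide (a < x)) (l := T)]
  rw [List.countP_append]
  have h1 : (T.takeWhile (fun a => decide (a < x))).countP (fun a => decide (a < x)) =
      (T.takeWhile (fun a => decide (a < x))).length := by
    apply List.countP_eq_length.mpr
    intro a ha
    have := List.mem_takeWhile_imp (p := fun a => decide (a < x)) ha
    simpa using this
  have h2 : (T.dropWhile (fun a => decide (a < x))).countP (fun a => decide (a < x)) = 0 := by
    apply List.countP_eq_zero.mpr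
    intro a ha
    have := mem_dropWhile_ge T x hs a ha
    simp; omega
  rw [h1, h2]
  omega

lemma countP_between (S : List Int) (l r1 : Int) (hs : S.Pairwise (· < ·)) (hlr : l ≤ r1) :
    S.countP (fun a => decide (l ≤ a) && decide (a < r1)) =
      PySem.List.bisectLeft S r1 - PySem.List.bisectLeft S l := by
  rw [bisect_eq_takeWhile S r1 hs, bisect_eq_takeWhile S l hs]
  rw [takeWhile_mono_split S l r1 hlr, List.length_append]
  have hsplit : S.countP (fun a => decide (l ≤ a) && decide (a < r1)) =
      (S.takeWhile (fun a => decide (a < l))).countP (fun a => decide (l ≤ a) && decide (a < r1)) +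
      (S.dropWhile (fun a => decide (a < l))).countP (fun a => decide (l ≤ a) && decide (a < r1)) := by
    conv_lhs => rw [← List.takeWhile_append_dropWhile (p := fun a => decide (a < l)) (l := S)]
    rw [List.countP_append]
  rw [hsplit]
  have h1 : (S.takeWhile (fun a => decide (a < l))).countP
      (fun a => decide (l ≤ a) && decide (a < r1)) = 0 := by
    apply List.countP_eq_zero.mpr
    intro a ha
    have := List.mem_takeWhile_imp ha
    simp at this ⊢; omega
  have h2 : (S.dropWhile (fun a => decide (a < l))).countP
      (fun a => decide (l ≤ a) && decide (a < r1)) =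
      (S.dropWhile (fun a => decide (a < l))).countP (fun a => decide (a < r1)) := by
    apply List.countP_congr
    intro a ha
    have := mem_dropWhile_ge S l hs a ha
    simp; omega
  rw [h1, h2, countP_sorted_lt _ r1 (hs.sublist (List.dropWhile_sublist _))]
  omega

lemma bisect_mono (S : List Int) (l r1 : Int) (hs : S.Pairwise (· < ·)) (hlr : l ≤ r1) :
    PySem.List.bisectLeft S l ≤ PySem.List.bisectLeft S r1 := by
  rw [bisect_eq_takeWhile S l hs, bisect_eq_takeWhile S r1 hs,
    takeWhile_mono_split S l r1 hlr, List.length_append]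
  omega

-- the surviving active list after a query, as B builds it
lemma S'_pairwise (S : List Int) (l r1 : Int) (hs : S.Pairwise (· < ·)) (hlr : l ≤ r1) :
    (S.takeWhile (fun a => decide (a < l)) ++ S.dropWhile (fun a => decide (a < r1))).Pairwise (· < ·) := by
  rw [List.pairwise_append]
  refine ⟨hs.sublist (List.takeWhile_sublist _), hs.sublist (List.dropWhile_sublist _), ?_⟩
  intro a ha b hb
  have h1 := List.mem_takeWhile_imp ha
  have h2 := mem_dropWhile_ge S r1 hs b hb
  simp at h1; omega

lemma mem_takeWhile_of_lt (S : List Int) (l a : Int) (hs : S.Pairwise (· < ·)) (ha : a ∈ S)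
    (hal : a < l) : a ∈ S.takeWhile (fun x => decide (x < l)) := by
  have : a ∈ S.takeWhile (fun x => decide (x < l)) ∨ a ∈ S.dropWhile (fun x => decide (x < l)) := by
    rw [← List.mem_append, List.takeWhile_append_dropWhile]; exact ha
  rcases this with h | h
  · exact h
  · exact absurd (mem_dropWhile_ge S l hs a h) (by omega)

lemma mem_dropWhile_of_ge (S : List Int) (r1 a : Int) (ha : a ∈ S) (har : r1 ≤ a) :
    a ∈ S.dropWhile (fun x => decide (x < r1)) := by
  have : a ∈ S.takeWhile (fun x => decide (x < r1)) ∨ a ∈ S.dropWhile (fun x => decide (x < r1)) := by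
    rw [← List.mem_append, List.takeWhile_append_dropWhile]; exact ha
  rcases this with h | h
  · have := List.mem_takeWhile_imp h; simp at this; omega
  · exact h

lemma gnext_collapse (L : Nat) (S : List Int) (l r1 : Int) (hS : SOK L S)
    (hl : 0 ≤ l) (hlr : l ≤ r1) (hr : r1 ≤ (L : Int) - 1) (p : Int) :
    (if l ≤ gnext S p ∧ gnext S p < r1 then gnext S r1 else gnext S p) =
      gnext (S.takeWhile (fun a => decide (a < l)) ++ S.dropWhile (fun a => decide (a < r1))) p := by
  obtain ⟨hsort, hbnd, hlast⟩ := hS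
  set S' := S.takeWhile (fun a => decide (a < l)) ++ S.dropWhile (fun a => decide (a < r1)) with hS'
  have hs' : S'.Pairwise (· < ·) := S'_pairwise S l r1 hsort hlr
  have hsub : ∀ a ∈ S', a ∈ S := by
    intro a ha
    rcases List.mem_append.1 ha with h | h
    · exact (List.takeWhile_sublist _).mem h
    · exact (List.dropWhile_sublist _).mem h
  have hrr : gnext S r1 ∈ S := gnext_mem S r1 ((L : Int) - 1) hlast (by omega)
  have hrrge : r1 ≤ gnext S r1 := gnext_ge S r1
  rcases gnext_mem_or S p with hgm | ⟨hge, hall⟩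
  · have hpg : p ≤ gnext S p := gnext_ge S p
    by_cases hc : l ≤ gnext S p ∧ gnext S p < r1
    · -- collapsed region: answer is gnext S r1
      rw [if_pos hc]
      apply (gnext_eq_of S' p (gnext S r1) hs' ?_ (by omega) ?_).symm
      · rw [hS']
        exact List.mem_append_right _ (mem_dropWhile_of_ge S r1 _ hrr (by omega))
      · intro a ha hpa
        rcases List.mem_append.1 ha with h | h
        · -- a < l yet p ≤ a: impossible since gnext S p ≥ l is minimal
          have h1 := List.mem_takeWhile_imp h
          simp at h1
          have := gnext_le S p a hsort (hsub a ha) hpa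
          omega
        · have := mem_dropWhile_ge S r1 hsort a h
          exact gnext_le S r1 a hsort (hsub a ha) this
    · rw [if_neg hc]
      apply (gnext_eq_of S' p (gnext S p) hs' ?_ (by omega) ?_).symm
      · rw [hS']
        by_cases hcl : gnext S p < l
        · exact List.mem_append_left _ (mem_takeWhile_of_lt S l _ hsort hgm hcl)
        · have : r1 ≤ gnext S p := by omega
          exact List.mem_append_right _ (mem_dropWhile_of_ge S r1 _ hgm this)
      · intro a ha hpa
        exact gnext_le S p a hsort (hsub a ha) hpa
  · -- everything in S is below p
    have hnone : ∀ a ∈ S', a < p := fun a ha => hall a (hsub a ha)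
    have hLlt : (L : Int) - 1 < p := hall _ hlast
    rw [gnext_eq_self S' p hnone]
    have : ¬ (l ≤ gnext S p ∧ gnext S p < r1) := by rw [hge]; omega
    rw [if_neg this, hge]

lemma gnext_infl (L : Nat) (S : List Int) (hS : SOK L S) :
    ∀ p : Int, 0 ≤ p → p < (L : Int) → p ≤ gnext S p ∧ gnext S p < (L : Int) := by
  intro p hp0 hpL
  refine ⟨gnext_ge S p, ?_⟩
  rcases gnext_mem_or S p with h | ⟨hge, _⟩
  · exact (hS.2.1 _ h).2
  · omega

lemma gnext_idem (L : Nat) (S : List Int) (hS : SOK L S) :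
    ∀ p : Int, 0 ≤ p → p < (L : Int) → gnext S (gnext S p) = gnext S p := by
  intro p hp0 hpL
  rcases gnext_mem_or S p with h | ⟨hge, hall⟩
  · exact gnext_self S _ hS.1 h
  · rw [hge, hge]

lemma fold_eq (L : Nat) :
    ∀ (qs : List (List Int)) (fa S : List Int) (cnt : Int) (ans : List Int),
      SOK L S → Kg fa (gnext S) → fa.length = L →
      (∀ q ∈ qs, q.length = 2 ∧ 0 ≤ q.getD 0 0 ∧ q.getD 0 0 < q.getD 1 0 ∧ q.getD 1 0 ≤ (L : Int)) →
      (qs.foldl stepA (fa, cnt, ans)).2.2 = (qs.foldl stepB (S, cnt, ans)).2.2 := by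
  intro qs
  induction qs with
  | nil => intro fa S cnt ans _ _ _ _; rfl
  | cons q qs ih =>
    intro fa S cnt ans hS hkg hlen hq
    obtain ⟨hq2, hq0, hqlt, hqle⟩ := hq q (by simp)
    -- q = [l, r]
    obtain ⟨l, r, rfl⟩ : ∃ l r, q = [l, r] := by
      match q, hq2 with
      | [l, r], _ => exact ⟨l, r, rfl⟩
    simp only [List.getD, List.getElem?_cons_zero, List.getElem?_cons_succ,
      Option.getD_some] at hq0 hqlt hqle
    obtain ⟨hsort, hbnd, hlast⟩ := hS
    have hr1 : 0 ≤ r - 1 := by omega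
    have hr2 : r - 1 < (L : Int) := by omega
    have hl2 : l < (L : Int) := by omega
    have hlr1 : l ≤ r - 1 := by omega
    have hL1 : 1 ≤ (L : Int) := by omega
    -- A side: find(r-1), find(l), merge loop
    obtain ⟨fa1, hfind1, hlen1, hkg1⟩ := findA_spec L (gnext S) (gnext_infl L S ⟨hsort, hbnd, hlast⟩)
      (gnext_idem L S ⟨hsort, hbnd, hlast⟩) (fa.length + 1) fa (r - 1) hlen hkg hr1 hr2 (by omega)
    obtain ⟨fa2, hfind2, hlen2, hkg2⟩ := findA_spec L (gnext S) (gnext_infl L S ⟨hsort, hbnd, hlast⟩)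
      (gnext_idem L S ⟨hsort, hbnd, hlast⟩) (fa1.length + 1) fa1 l hlen1 hkg1 hq0 hl2 (by omega)
    have hi0S : gnext S l ∈ S := gnext_mem S l ((L : Int) - 1) hlast (by omega)
    have hi0ge : l ≤ gnext S l := gnext_ge S l
    obtain ⟨fa3, hloop, hlen3, hkg3⟩ := loopA_spec L S l r (gnext S (r - 1))
      ⟨hsort, hbnd, hlast⟩ rfl hr1 hr2 hq0 hlr1 (fa2.length + 1) fa2 cnt (gnext S l) []
      hlen2 hi0S hi0ge
      (by intro s hs hsi
          have := (gnext_lt_iff S l s hsort hs).1 hsi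
          omega)
      (by intro x
          simp only [List.not_mem_nil, false_iff]
          rintro ⟨h1, h2, h3⟩
          have := (gnext_lt_iff S l x hsort h1).1 h3
          omega)
      (by apply Kg_congr _ _ _ _ hkg2
          intro p
          simp)
      (by omega)
    -- count bookkeeping
    set ii := PySem.List.bisectLeft S l with hii
    set jj := PySem.List.bisectLeft S (r - 1) with hjj
    have hij : ii ≤ jj := bisect_mono S l (r - 1) hsort hlr1
    have hjlen : jj ≤ S.length := by
      rw [hjj, bisect_eq_takeWhile S (r - 1) hsort]
      exact (List.takeWhile_sublist _).length_le
    have hcnt : (S.countP (fun a => decide (gnext S l ≤ a) && decide (a < r - 1)) : Int) =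
        (jj : Int) - (ii : Int) := by
      have hcongr : S.countP (fun a => decide (gnext S l ≤ a) && decide (a < r - 1)) =
          S.countP (fun a => decide (l ≤ a) && decide (a < r - 1)) := by
        apply List.countP_congr
        intro a ha
        have h1 : l ≤ a → gnext S l ≤ a := fun h => gnext_le S l a hsort ha h
        simp only [← Bool.decide_and]
        have hiff : (gnext S l ≤ a ∧ a < r - 1) ↔ (l ≤ a ∧ a < r - 1) := by
          constructor
          · rintro ⟨x, y⟩; exact ⟨by omega, y⟩
          · rintro ⟨x, y⟩; exact ⟨h1 x, y⟩
        simp [hiff]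
      rw [hcongr, countP_between S l (r - 1) hsort hlr1, ← hii, ← hjj]
      omega
    -- the new active list
    set S' := S.takeWhile (fun a => decide (a < l)) ++ S.dropWhile (fun a => decide (a < r - 1))
      with hS'
    have hS'take : S.take ii ++ S.drop jj = S' := by
      rw [hii, hjj, take_bisect S l hsort, drop_bisect S (r - 1) hsort]
    have hS'sub : ∀ a ∈ S', a ∈ S := by
      intro a ha
      rcases List.mem_append.1 ha with h | h
      · exact (List.takeWhile_sublist _).mem h
      · exact (List.dropWhile_sublist _).mem h
    have hS'ok : SOK L S' := by
      refine ⟨S'_pairwise S l (r - 1) hsort hlr1, fun a ha => hbnd a (hS'sub a ha), ?_⟩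
      rw [hS']
      exact List.mem_append_right _ (mem_dropWhile_of_ge S (r - 1) _ hlast (by omega))
    have hkg3' : Kg fa3 (gnext S') := by
      apply Kg_congr _ _ _ _ hkg3
      intro p
      exact gnext_collapse L S l (r - 1) ⟨hsort, hbnd, hlast⟩ hq0 hlr1 (by omega) p
    -- unfold one fold step on each side
    have hstepA : stepA (fa, cnt, ans) [l, r] =
        (fa3, cnt - ((jj : Int) - (ii : Int)),
          ans ++ [cnt - ((jj : Int) - (ii : Int))]) := by
      show (let p1 := findA (fa.length + 1) fa (r - 1)
            let rr := p1.2
            let p2 := findA (p1.1.length + 1) p1.1 l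
            let res := loopA (p2.1.length + 1) p2.1 cnt p2.2 rr r
            (res.1, res.2, ans ++ [res.2])) = _
      simp only [hfind1, hfind2, hloop, hcnt]
    have hstepB : stepB (S, cnt, ans) [l, r] =
        (S', cnt - ((jj : Int) - (ii : Int)),
          ans ++ [cnt - ((jj : Int) - (ii : Int))]) := by
      show (let i := PySem.List.bisectLeft S l
            let j := PySem.List.bisectLeft S (r - 1)
            let active' := S.take i ++ S.drop (max i j)
            let cnt' := cnt - ((j : Int) - (i : Int))
            (active', cnt', ans ++ [cnt'])) = _
      simp only [← hii, ← hjj, Nat.max_eq_right hij, hS'take]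
    rw [List.foldl_cons, List.foldl_cons, hstepA, hstepB]
    exact ih fa3 S' _ _ hS'ok hkg3' hlen3 (fun q hq' => hq q (by simp [hq']))

lemma pyRange_eq (L : Nat) : PySem.List.pyRange 0 (L : Int) 1 = (List.range L).map (fun k : Nat => (k : Int)) :=
  PySem.List.pyRange_zero_natCast L

lemma init_len (L : Nat) : (PySem.List.pyRange 0 (L : Int) 1).length = L := by
  simp [pyRange_eq]

lemma init_sok (L : Nat) (hL : 1 ≤ L) : SOK L (PySem.List.pyRange 0 (L : Int) 1) := by
  refine ⟨?_, ?_, ?_⟩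
  · rw [pyRange_eq, List.pairwise_map]
    exact List.pairwise_lt_range.imp (by intro a b h; exact_mod_cast h)
  · intro a ha
    rw [PySem.List.mem_pyRange_one] at ha
    exact ha
  · rw [PySem.List.mem_pyRange_one]
    omega

lemma init_kg (L : Nat) (hL : 1 ≤ L) :
    Kg (PySem.List.pyRange 0 (L : Int) 1) (gnext (PySem.List.pyRange 0 (L : Int) 1)) := by
  intro k hk
  rw [init_len] at hk
  have hget : (PySem.List.pyRange 0 (L : Int) 1)[k]'(by rw [init_len]; exact hk) = (k : Int) := by
    simp [pyRange_eq]
  constructor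
  · intro _
    apply gnext_self _ _ (init_sok L hL).1
    rw [PySem.List.mem_pyRange_one]
    omega
  · intro hne
    rw [hget] at hne
    exact absurd rfl hne

theorem ports_agree (n : Int) (queries : List (List Int))
    (hpre : Pre_shortestDistanceAfterQueries n queries) :
    shortestDistanceAfterQueries n queries = shortestDistanceAfterQueries_alt n queries := by
  unfold shortestDistanceAfterQueries shortestDistanceAfterQueries_alt
  match queries with
  | [] => rfl
  | q :: qs =>
    obtain ⟨h2, h0, hlt, hle⟩ := hpre q (by simp)
    have hn2 : 2 ≤ n := by omega
    set L := (n - 1).toNat with hLdef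
    have hcast : ((L : Nat) : Int) = n - 1 := by omega
    have hL1 : 1 ≤ L := by omega
    rw [← hcast]
    exact fold_eq L (q :: qs) _ _ ((L : Nat) : Int) [] (init_sok L hL1) (init_kg L hL1) (init_len L)
      (fun q' hq' => by
        obtain ⟨a2, a0, alt, ale⟩ := hpre q' hq'
        exact ⟨a2, a0, alt, by omega⟩)

-- ===== VERDICT (by name: the statement is the Claim_ definition above) =====
theorem shortestDistanceAfterQueries_spec : Claim_equal_shortestDistanceAfterQueries := by
  intro n queries _ hpre
  unfold Spec_shortestDistanceAfterQueries
  exact ports_agree n queries hpre
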